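-- pv_equiv track=rewrite | github.com/thealper2/codewars-solutions | 7-kyu/encode_data_on_cd_compact_disc_surface.py | encode_cd
-- ===== SOURCE A (Python) =====
-- def encode_cd(n):
--     bits = bin(n)[2:].zfill(8)[::-1]
--     result = ['P']
--     for bit in bits:
--         if bit == '1':
--             result.append('L' if result[-1] == 'P' else 'P')
--         else:
--             result.append(result[-1])
--
--     return ''.join(result)
-- ===== SOURCE B (Python) =====
-- def encode_cd(n):
--     bits = bin(n)[2:].zfill(8)[::-1]
--     return ''.join('PL'[bits[:i].count('1') % 2] for i in range(len(bits) + 1))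
-- ===== Notes on version B (the rewrite author's own statement) =====
-- stated objective: simpler
-- what changed: B replaces A's output-dependent loop (each symbol branches on the previously emitted symbol) by a direct formula: symbol i is 'P' or 'L' according to the parity of the count of 1-bits in the first i bits, built with a comprehension and no accumulator.
import Mathlib
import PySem

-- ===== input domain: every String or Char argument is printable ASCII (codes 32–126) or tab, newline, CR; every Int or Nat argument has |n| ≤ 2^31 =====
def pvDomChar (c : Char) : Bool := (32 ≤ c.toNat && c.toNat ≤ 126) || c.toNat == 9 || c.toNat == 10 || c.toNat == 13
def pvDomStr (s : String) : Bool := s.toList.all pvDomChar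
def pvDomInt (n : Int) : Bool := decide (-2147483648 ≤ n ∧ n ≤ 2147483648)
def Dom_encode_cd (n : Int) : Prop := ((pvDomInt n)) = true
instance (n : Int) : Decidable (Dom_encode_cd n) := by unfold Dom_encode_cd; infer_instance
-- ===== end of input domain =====

-- B replaces A's previous-symbol-dependent loop by a direct prefix-1-bit-parity formula (objective: simpler).

-- shared bits expression: bin(n)[2:].zfill(8)[::-1]  (bin(-m)[2:] = "b" ++ binary of m)
def pvBits (n : Int) : List Char :=
  let raw := if n < 0 then 'b' :: Nat.toDigits 2 n.natAbs else Nat.toDigits 2 n.toNat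
  (List.replicate (8 - raw.length) '0' ++ raw).reverse

-- ===== PORT A =====
def pvStepA (result : List Char) (bit : Char) : List Char :=
  if bit = '1' then result ++ [if result.getLast! = 'P' then 'L' else 'P']
  else result ++ [result.getLast!]

def encode_cd (n : Int) : String := String.ofList ((pvBits n).foldl pvStepA ['P'])

-- ===== PORT B =====
def pvParityChar (bits : List Char) (i : Nat) : Char :=
  if (bits.take i).count '1' % 2 = 0 then 'P' else 'L'

def encode_cd_alt (n : Int) : String :=
  String.ofList ((List.range ((pvBits n).length + 1)).map (pvParityChar (pvBits n)))

-- ===== PRECONDITION & SPEC =====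
def Spec_encode_cd (n : Int) (out : String) : Prop := out = encode_cd_alt n
instance (n : Int) (out : String) : Decidable (Spec_encode_cd n out) := by unfold Spec_encode_cd; infer_instance

-- ===== CLAIM (what is proved, stated in full; the proofs are below) =====
def Claim_equal_encode_cd : Prop := ∀ (n : Int), Dom_encode_cd n → Spec_encode_cd n (encode_cd n)

-- ===== LEMMAS AND PROOFS =====

theorem pv_getLast!_concat (xs : List Char) (a : Char) : (xs ++ [a]).getLast! = a := by
  simp [List.getLast!_eq_getLast?_getD]

theorem pv_last_map_range (f : Nat → Char) (m : Nat) :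
    ((List.range (m + 1)).map f).getLast! = f m := by
  rw [List.range_succ, List.map_append]
  exact pv_getLast!_concat _ _

theorem pv_foldl_eq_parity (bs : List Char) :
    bs.foldl pvStepA ['P'] = (List.range (bs.length + 1)).map (pvParityChar bs) := by
  induction bs using List.reverseRecOn with
  | nil => simp [pvParityChar]
  | append_singleton bs b ih =>
    rw [List.foldl_append, ih]
    have hlen : (bs ++ [b]).length = bs.length + 1 := by simp
    rw [hlen]
    conv_rhs => rw [List.range_succ, List.map_append]
    have hpref : (List.range (bs.length + 1)).map (pvParityChar (bs ++ [b])) =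
        (List.range (bs.length + 1)).map (pvParityChar bs) := by
      apply List.map_congr_left
      intro i hi
      have hile : i ≤ bs.length := by
        have := List.mem_range.mp hi; omega
      simp [pvParityChar, List.take_append_of_le_length hile]
    rw [hpref]
    have hlast : ((List.range (bs.length + 1)).map (pvParityChar bs)).getLast! =
        pvParityChar bs bs.length := pv_last_map_range _ _
    have htake : (bs ++ [b]).take (bs.length + 1) = bs ++ [b] := by
      apply List.take_of_length_le; simp
    simp only [List.foldl_cons, List.foldl_nil, pvStepA, List.map_cons, List.map_nil]
    rw [hlast]
    by_cases hb : b = '1'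
    · subst hb
      have hcnt : ((bs ++ ['1']).take (bs.length + 1)).count '1' = bs.count '1' + 1 := by
        rw [htake]; simp
      simp only [pvParityChar, List.take_length, hcnt]
      rcases Nat.even_or_odd (bs.count '1') with h | h
      · have h0 : bs.count '1' % 2 = 0 := Nat.even_iff.mp h
        have h1 : (bs.count '1' + 1) % 2 = 1 := by omega
        simp [h0, h1]
      · have h0 : bs.count '1' % 2 = 1 := Nat.odd_iff.mp h
        have h1 : (bs.count '1' + 1) % 2 = 0 := by omega
        simp [h0, h1]
    · simp only [if_neg hb]
      congr 1
      have hcnt : ((bs ++ [b]).take (bs.length + 1)).count '1' = bs.count '1' := by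
        rw [htake, List.count_append]
        simp [hb]
      simp [pvParityChar, hcnt]

-- ===== VERDICT (by name: the statement is the Claim_ definition above) =====
theorem encode_cd_spec : Claim_equal_encode_cd := by
  intro n _
  unfold Spec_encode_cd encode_cd encode_cd_alt
  rw [pv_foldl_eq_parity]
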